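-- pv_equiv track=rewrite | github.com/Julien-pour/arc_example | 32b_gen0-1/46f33fce/task.py | transform
-- ===== SOURCE A (Python) =====
-- def transform(grid):
--     n = len(grid)
--     new_grid = [[0] * (n * 2) for _ in range(n * 2)]
--     for i in range(n):
--         for j in range(n):
--             color = grid[i][j]
--             if color != 0:
--                 new_grid[i * 2][j * 2] = color
--     return new_grid
-- ===== SOURCE B (Python) =====
-- def transform(grid):
--     n = len(grid)
--     out = []
--     for row in grid:
--         out.append([x for j in range(n) for x in (row[j], 0)])
--         out.append([0] * (2 * n))
--     return out
-- ===== Notes on version B (the rewrite author's own statement) =====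
-- stated objective: simpler
-- what changed: B builds the output row by row (each input row becomes an interleaved row [c,0,c,0,...] followed by an all-zero row) instead of pre-allocating a 2n x 2n zero matrix and scatter-writing non-zero cells at even coordinates; the per-cell zero test disappears.
import Mathlib
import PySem

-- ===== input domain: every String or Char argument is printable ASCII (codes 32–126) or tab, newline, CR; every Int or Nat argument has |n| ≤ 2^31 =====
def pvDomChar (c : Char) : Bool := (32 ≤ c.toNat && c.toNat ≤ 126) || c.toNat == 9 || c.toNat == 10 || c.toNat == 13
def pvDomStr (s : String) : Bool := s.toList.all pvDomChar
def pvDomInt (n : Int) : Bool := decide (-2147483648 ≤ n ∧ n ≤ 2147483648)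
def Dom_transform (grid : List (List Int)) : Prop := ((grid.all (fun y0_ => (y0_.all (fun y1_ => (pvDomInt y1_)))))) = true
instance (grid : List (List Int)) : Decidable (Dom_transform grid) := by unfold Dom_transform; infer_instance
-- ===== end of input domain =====

-- B builds each output row directly (interleaved row, then a zero row) instead of
-- scatter-writing non-zero cells into a pre-allocated 2n x 2n zero matrix (objective: simpler).

-- ===== PORT A =====
def transform (grid : List (List Int)) : List (List Int) :=
  let n := grid.length
  let new_grid := (List.range (n * 2)).map (fun _ => List.replicate (n * 2) (0 : Int))
  (List.range n).foldl (fun ng i =>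
    (List.range n).foldl (fun ng j =>
      let color := (grid.getD i []).getD j 0
      if color ≠ 0 then ng.set (i * 2) ((ng.getD (i * 2) []).set (j * 2) color) else ng) ng) new_grid

-- ===== PORT B =====
def transform_alt (grid : List (List Int)) : List (List Int) :=
  let n := grid.length
  grid.foldl (fun out row =>
    out ++ [(List.range n).flatMap (fun j => [row.getD j 0, (0 : Int)]),
            List.replicate (2 * n) (0 : Int)]) []

-- ===== PRECONDITION & SPEC =====
-- Pre_ excludes exactly the inputs on which A raises IndexError: grids in which
-- some row is shorter than the number of rows n (A reads grid[i][j] for all j < n).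
def Pre_transform (grid : List (List Int)) : Prop :=
  ∀ row ∈ grid, grid.length ≤ row.length
instance (grid : List (List Int)) : Decidable (Pre_transform grid) := by
  unfold Pre_transform; infer_instance
def pvWitness_transform : List (List Int) := [[1, 0], [0, 2]]

def Spec_transform (grid : List (List Int)) (out : List (List Int)) : Prop := out = transform_alt grid
instance (grid : List (List Int)) (out : List (List Int)) : Decidable (Spec_transform grid out) := by unfold Spec_transform; infer_instance

-- ===== CLAIM (what is proved, stated in full; the proofs are below) =====
def Claim_equal_transform : Prop := ∀ (grid : List (List Int)), Dom_transform grid → Pre_transform grid → Spec_transform grid (transform grid)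

-- ===== LEMMAS AND PROOFS =====

lemma pvGetD_set_self {α : Type} (l : List α) (i : Nat) (a d : α) (h : i < l.length) :
    (l.set i a).getD i d = a := by
  simp [List.getD, h]

lemma pvSet_getD_self {α : Type} (l : List α) (i : Nat) (d : α) (h : i < l.length) :
    l.set i (l.getD i d) = l := by
  simp [List.getD, List.getElem?_eq_getElem h, List.set_getElem_self]

def scatStep (row : List Int) (z : List Int) (j : Nat) : List Int :=
  if row.getD j 0 ≠ 0 then z.set (j * 2) (row.getD j 0) else z

def gridStep (grid : List (List Int)) (i : Nat) (ng : List (List Int)) (j : Nat) : List (List Int) :=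
  if (grid.getD i []).getD j 0 ≠ 0
  then ng.set (i * 2) ((ng.getD (i * 2) []).set (j * 2) ((grid.getD i []).getD j 0)) else ng

lemma inner_lift (grid : List (List Int)) (i : Nat) (js : List Nat) (ng : List (List Int))
    (hi : i * 2 < ng.length) :
    js.foldl (gridStep grid i) ng
      = ng.set (i * 2) (js.foldl (scatStep (grid.getD i [])) (ng.getD (i * 2) [])) := by
  induction js generalizing ng with
  | nil => exact (pvSet_getD_self ng (i * 2) [] hi).symm
  | cons j js ih =>
    simp only [List.foldl_cons]
    by_cases hc : (grid.getD i []).getD j 0 ≠ 0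
    · rw [show gridStep grid i ng j
          = ng.set (i * 2) ((ng.getD (i * 2) []).set (j * 2) ((grid.getD i []).getD j 0)) from
        if_pos hc]
      rw [ih _ (by simpa using hi), List.set_set]
      rw [pvGetD_set_self _ _ _ _ hi]
      congr 1
      rw [show scatStep (grid.getD i []) (ng.getD (i * 2) []) j
          = (ng.getD (i * 2) []).set (j * 2) ((grid.getD i []).getD j 0) from if_pos hc]
    · rw [show gridStep grid i ng j = ng from if_neg hc, ih _ hi]
      congr 1
      rw [show scatStep (grid.getD i []) (ng.getD (i * 2) []) j = ng.getD (i * 2) [] from if_neg hc]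

def scatForm (row : List Int) (n m : Nat) : List Int :=
  (List.range (n * 2)).map (fun k => if k % 2 = 0 ∧ k / 2 < m then row.getD (k / 2) 0 else 0)

lemma scatter_eq_form (row : List Int) (n m : Nat) (hm : m ≤ n) :
    (List.range m).foldl (scatStep row) (List.replicate (n * 2) 0) = scatForm row n m := by
  induction m with
  | zero =>
    apply List.ext_getElem <;> simp [scatForm]
  | succ m ih =>
    rw [List.range_succ, List.foldl_append, ih (by omega), List.foldl_cons, List.foldl_nil]
    by_cases hc : row.getD m 0 ≠ 0
    · rw [show scatStep row (scatForm row n m) m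
          = (scatForm row n m).set (m * 2) (row.getD m 0) from if_pos hc]
      apply List.ext_getElem
      · simp [scatForm]
      · intro k h1 h2
        simp only [scatForm, List.getElem_set, List.getElem_map, List.getElem_range,
          List.length_map, List.length_range] at *
        by_cases hk : m * 2 = k
        · have h2m : k / 2 = m := by omega
          rw [if_pos hk, if_pos (by omega), h2m]
        · rw [if_neg hk]
          have : (k % 2 = 0 ∧ k / 2 < m) ↔ (k % 2 = 0 ∧ k / 2 < m + 1) := by omega
          rw [if_congr this rfl rfl]
    · push_neg at hc
      rw [show scatStep row (scatForm row n m) m = scatForm row n m from if_neg (not_not_intro hc)]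
      apply List.ext_getElem
      · simp [scatForm]
      · intro k h1 h2
        simp only [scatForm, List.getElem_map, List.getElem_range,
          List.length_map, List.length_range] at *
        by_cases hk : k = m * 2
        · rw [if_neg (by omega), if_pos (by omega)]
          have : k / 2 = m := by omega
          rw [this, hc]
        · have : (k % 2 = 0 ∧ k / 2 < m) ↔ (k % 2 = 0 ∧ k / 2 < m + 1) := by omega
          rw [if_congr this rfl rfl]

def outForm (grid : List (List Int)) (m : Nat) : List (List Int) :=
  (List.range (grid.length * 2)).map (fun r =>
    if r % 2 = 0 ∧ r / 2 < m then scatForm (grid.getD (r / 2) []) grid.length grid.length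
    else List.replicate (grid.length * 2) 0)

lemma getD_map_range {α : Type} (f : Nat → α) (N k : Nat) (d : α) (h : k < N) :
    ((List.range N).map f).getD k d = f k := by
  simp [List.getD, List.getElem?_map, List.getElem?_range, h]

lemma outer_eq_form (grid : List (List Int)) (m : Nat) (hm : m ≤ grid.length) :
    (List.range m).foldl (fun ng i => (List.range grid.length).foldl (gridStep grid i) ng)
        ((List.range (grid.length * 2)).map (fun _ => List.replicate (grid.length * 2) (0 : Int)))
      = outForm grid m := by
  induction m with
  | zero =>
    apply List.ext_getElem <;> simp [outForm]
  | succ m ih =>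
    rw [List.range_succ, List.foldl_append, ih (by omega), List.foldl_cons, List.foldl_nil]
    rw [inner_lift grid m _ _ (by simp [outForm]; omega)]
    rw [show (outForm grid m).getD (m * 2) [] = List.replicate (grid.length * 2) 0 from by
      rw [outForm, getD_map_range _ _ _ _ (by omega), if_neg (by omega)]]
    rw [scatter_eq_form _ _ _ (le_refl grid.length)]
    have hmd : m * 2 / 2 = m := by omega
    apply List.ext_getElem
    · simp [outForm]
    · intro k h1 h2
      simp only [outForm, List.getElem_set, List.getElem_map, List.getElem_range,
        List.length_map, List.length_range] at *
      by_cases hk : m * 2 = k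
      · rw [if_pos hk, if_pos (by omega)]
        have : k / 2 = m := by omega
        rw [this]
      · rw [if_neg hk]
        have : (k % 2 = 0 ∧ k / 2 < m) ↔ (k % 2 = 0 ∧ k / 2 < m + 1) := by omega
        rw [if_congr this rfl rfl]

lemma pairFlat_get? {α β : Type} (f g : α → β) (l : List α) (k : Nat) :
    (l.flatMap (fun a => [f a, g a]))[k]?
      = (l[k / 2]?).map (fun a => if k % 2 = 0 then f a else g a) := by
  induction l generalizing k with
  | nil => simp
  | cons a l ih =>
    rw [List.flatMap_cons]
    match k with
    | 0 => simp
    | 1 => simp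
    | (k + 2) =>
      have h1 : (k + 2) / 2 = k / 2 + 1 := by omega
      have h2 : (k + 2) % 2 = k % 2 := by omega
      simp only [List.cons_append, List.nil_append, List.getElem?_cons_succ, h1, h2, ih]

lemma foldl_app_acc {α β : Type} (f : α → List β) (l : List α) (acc : List β) :
    l.foldl (fun out x => out ++ f x) acc = acc ++ l.flatMap f := by
  induction l generalizing acc with
  | nil => simp
  | cons a l ih => simp [ih, List.append_assoc]

lemma inter_eq_form (row : List Int) (n : Nat) :
    (List.range n).flatMap (fun j => [row.getD j 0, (0 : Int)]) = scatForm row n n := by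
  apply List.ext_getElem?
  intro k
  rw [pairFlat_get? (fun j => row.getD j 0) (fun _ => (0 : Int)) (List.range n) k]
  rcases Nat.lt_or_ge k (n * 2) with hk | hk
  · have hk2 : k / 2 < n := by omega
    rw [List.getElem?_range hk2, scatForm, List.getElem?_map, List.getElem?_range hk]
    simp only [Option.map_some]
    by_cases he : k % 2 = 0
    · rw [if_pos he, if_pos ⟨he, hk2⟩]
    · rw [if_neg he, if_neg (by omega)]
  · rw [List.getElem?_eq_none (by simp; omega), List.getElem?_eq_none (by simp [scatForm]; omega)]
    simp

lemma transform_eq_outForm (grid : List (List Int)) :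
    transform grid = outForm grid grid.length := by
  have h : transform grid
      = (List.range grid.length).foldl
          (fun ng i => (List.range grid.length).foldl (gridStep grid i) ng)
          ((List.range (grid.length * 2)).map (fun _ => List.replicate (grid.length * 2) (0 : Int))) := rfl
  rw [h, outer_eq_form grid grid.length (le_refl _)]

lemma alt_eq_flatMap (grid : List (List Int)) :
    transform_alt grid
      = grid.flatMap (fun row =>
          [(List.range grid.length).flatMap (fun j => [row.getD j 0, (0 : Int)]),
           List.replicate (2 * grid.length) 0]) := by
  have h : transform_alt grid
      = grid.foldl (fun out row => out ++
          [(List.range grid.length).flatMap (fun j => [row.getD j 0, (0 : Int)]),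
           List.replicate (2 * grid.length) 0]) [] := rfl
  rw [h, foldl_app_acc, List.nil_append]

theorem main_eq (grid : List (List Int)) :
    transform grid = transform_alt grid := by
  rw [transform_eq_outForm, alt_eq_flatMap]
  apply List.ext_getElem?
  intro r
  rw [pairFlat_get?
    (fun row => (List.range grid.length).flatMap (fun j => [row.getD j 0, (0 : Int)]))
    (fun _ => List.replicate (2 * grid.length) (0 : Int)) grid r]
  rw [outForm, List.getElem?_map]
  rcases Nat.lt_or_ge r (grid.length * 2) with hr | hr
  · have hr2 : r / 2 < grid.length := by omega
    rw [List.getElem?_range hr, List.getElem?_eq_getElem hr2]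
    simp only [Option.map_some]
    by_cases he : r % 2 = 0
    · rw [if_pos ⟨he, hr2⟩, if_pos he]
      rw [show grid.getD (r / 2) [] = grid[r / 2] from by
        simp [List.getD, List.getElem?_eq_getElem hr2]]
      exact congrArg some (inter_eq_form grid[r / 2] grid.length).symm
    · rw [if_neg (by omega), if_neg he, Nat.mul_comm]
  · rw [List.getElem?_eq_none (show (List.range (grid.length * 2)).length ≤ r by simpa using hr),
      List.getElem?_eq_none (show grid.length ≤ r / 2 by omega)]
    simp

-- ===== VERDICT (by name: the statement is the Claim_ definition above) =====
theorem transform_spec : Claim_equal_transform := by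
  intro grid _ _
  unfold Spec_transform
  exact main_eq grid
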